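-- pv_equiv track=rewrite | github.com/YogeshKumarPatel873/RefinechainLLM | main.py | mergeCells
-- ===== SOURCE A (Python) =====
-- def mergeCells(row):
--     merged_row = []
--     cell_to_merge = ""
--     for cell in row:
--         if cell is not None:
--             if cell_to_merge:
--                 merged_row.append(cell_to_merge)
--                 cell_to_merge = ""
--             merged_row.append(cell)
--         else:
--             if cell_to_merge:
--                 # If already in a sequence of Nones, continue appending Nones
--                 cell_to_merge += " "
--             else:
--                 # Start of a new sequence of Nones
--                 temp = ''
--                 if len(merged_row) > 0:
--                     temp = merged_row.pop()
--                 cell_to_merge = temp + " "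
--     if cell_to_merge:  # If the last cells were Nones, append the merged content
--         merged_row.append(cell_to_merge)
--     return merged_row
-- ===== SOURCE B (Python) =====
-- def mergeCells(row):
--     # Run-based single pass: each maximal run of Nones becomes k spaces merged
--     # into the preceding output cell (or its own cell at the start).
--     res = []
--     i = 0
--     n = len(row)
--     while i < n:
--         if row[i] is None:
--             j = i
--             while j < n and row[j] is None:
--                 j += 1
--             pad = " " * (j - i)
--             if res:
--                 res[-1] = res[-1] + pad
--             else:
--                 res.append(pad)
--             i = j
--         else:
--             res.append(row[i])
--             i += 1
--     return res
-- ===== Notes on version B (the rewrite author's own statement) =====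
-- stated objective: alternative
-- what changed: Replaces A's string-accumulator with end-of-loop flush by a run-based pass: each maximal run of k Nones is located with an inner scan and its k spaces are appended onto the last output cell in one step.
import Mathlib
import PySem

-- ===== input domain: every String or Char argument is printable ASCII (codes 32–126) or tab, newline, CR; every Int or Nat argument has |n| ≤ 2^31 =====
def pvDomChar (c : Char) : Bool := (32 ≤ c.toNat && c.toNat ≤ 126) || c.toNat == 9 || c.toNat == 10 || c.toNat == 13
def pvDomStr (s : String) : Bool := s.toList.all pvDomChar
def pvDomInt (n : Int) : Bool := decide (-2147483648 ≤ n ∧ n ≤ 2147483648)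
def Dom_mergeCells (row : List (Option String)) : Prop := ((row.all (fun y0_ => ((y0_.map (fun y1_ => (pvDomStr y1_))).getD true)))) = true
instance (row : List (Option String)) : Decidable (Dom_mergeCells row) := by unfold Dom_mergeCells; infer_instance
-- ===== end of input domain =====

-- B is a run-based re-decomposition of A's per-cell accumulator loop; same value on every input.

-- ===== PORT A =====
-- A's loop as structural recursion over the row; state = (merged_row, cell_to_merge).
-- The final 'if cell_to_merge: append' flush is the [] base case.
def mergeCellsGoA (merged : List String) (cur : String) : List (Option String) → List String
  | [] => if cur ≠ "" then merged ++ [cur] else merged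
  | cell :: rest =>
    match cell with
    | some c =>
      if cur ≠ "" then mergeCellsGoA ((merged ++ [cur]) ++ [c]) "" rest
      else mergeCellsGoA (merged ++ [c]) "" rest
    | none =>
      if cur ≠ "" then mergeCellsGoA merged (cur ++ " ") rest
      else
        -- temp = merged_row.pop() if merged_row else ''   (pop of the LAST element)
        match merged.getLast? with
        | some t => mergeCellsGoA merged.dropLast (t ++ " ") rest
        | none => mergeCellsGoA merged (" ") rest

def mergeCells (row : List (Option String)) : List String :=
  mergeCellsGoA [] "" row

-- ===== PORT B =====
-- length of the leading run of Nones, and the remainder after it (B's inner 'while' scan)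
def mergeCellsSplit : List (Option String) → Nat × List (Option String)
  | none :: rest => let p := mergeCellsSplit rest; (p.1 + 1, p.2)
  | l => (0, l)

theorem mergeCellsSplit_len : ∀ (l : List (Option String)), (mergeCellsSplit l).2.length ≤ l.length
  | [] => by simp [mergeCellsSplit]
  | none :: rest => by
      simpa [mergeCellsSplit] using Nat.le_succ_of_le (mergeCellsSplit_len rest)
  | some c :: rest => by simp [mergeCellsSplit]

-- res[-1] = res[-1] + pad, or res.append(pad) when res is empty
def mergeCellsPad (res : List String) (pad : String) : List String :=
  match res.getLast? with
  | some t => res.dropLast ++ [t ++ pad]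
  | none => [pad]

def mergeCellsGoB (res : List String) : List (Option String) → List String
  | [] => res
  | none :: rest =>
      let p := mergeCellsSplit rest
      mergeCellsGoB (mergeCellsPad res (String.ofList (List.replicate (p.1 + 1) ' '))) p.2
  | some c :: rest => mergeCellsGoB (res ++ [c]) rest
termination_by l => l.length
decreasing_by
  · have := mergeCellsSplit_len rest; simp; omega
  · simp

def mergeCells_alt (row : List (Option String)) : List String :=
  mergeCellsGoB [] row

-- ===== PRECONDITION & SPEC =====
def Spec_mergeCells (row : List (Option String)) (out : List String) : Prop := out = mergeCells_alt row
instance (row : List (Option String)) (out : List String) : Decidable (Spec_mergeCells row out) := by unfold Spec_mergeCells; infer_instance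

-- ===== CLAIM (what is proved, stated in full; the proofs are below) =====
def Claim_equal_mergeCells : Prop := ∀ (row : List (Option String)), Dom_mergeCells row → Spec_mergeCells row (mergeCells row)

-- ===== LEMMAS AND PROOFS =====

theorem pad_comp (res : List String) (s t : String) :
    mergeCellsPad (mergeCellsPad res s) t = mergeCellsPad res (s ++ t) := by
  cases h : res.getLast? with
  | none => simp [mergeCellsPad, h]
  | some a =>
      simp [mergeCellsPad, h, String.append_assoc]

theorem goB_none_step (res : List String) (rest : List (Option String)) :
    mergeCellsGoB res (none :: rest) = mergeCellsGoB (mergeCellsPad res " ") rest := by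
  match rest with
  | [] => simp [mergeCellsGoB, mergeCellsSplit]
  | some c :: r => simp [mergeCellsGoB, mergeCellsSplit]
  | none :: r =>
      rw [mergeCellsGoB, mergeCellsGoB]
      simp only [mergeCellsSplit, pad_comp]
      congr 1
      apply congrArg
      rw [List.replicate_succ]
      apply String.toList_injective; simp

theorem append_space_ne (s : String) : s ++ " " ≠ "" := by
  intro h
  have := congrArg String.toList h
  simp at this

theorem goA_eq_goB : ∀ (row : List (Option String)) (merged : List String) (cur : String),
    mergeCellsGoA merged cur row =
      mergeCellsGoB (if cur ≠ "" then merged ++ [cur] else merged) row := by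
  intro row
  induction row with
  | nil => intro merged cur; by_cases h : cur = "" <;> simp [mergeCellsGoA, mergeCellsGoB, h]
  | cons cell rest ih =>
    intro merged cur
    match cell with
    | some c =>
      by_cases h : cur = ""
      · simp [mergeCellsGoA, mergeCellsGoB, h, ih]
      · simp [mergeCellsGoA, mergeCellsGoB, h, ih]
    | none =>
      by_cases h : cur = ""
      · subst h
        cases hm : merged.getLast? with
        | none =>
            have hm' : merged = [] := by
              cases merged with
              | nil => rfl
              | cons a l => simp [List.getLast?_eq_some_getLast] at hm
            simp [mergeCellsGoA, ih, goB_none_step, hm', mergeCellsPad]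
        | some t =>
            rw [goB_none_step]
            simp only [mergeCellsGoA, hm, ih]

            have h1 : t ++ " " ≠ "" := append_space_ne t
            simp only [ne_eq, h1, not_false_eq_true, if_pos]
            simp [mergeCellsPad, hm]
      · rw [goB_none_step]
        simp only [mergeCellsGoA, ih]
        have h1 : cur ++ " " ≠ "" := append_space_ne cur
        simp only [ne_eq, h, h1, not_false_eq_true, if_pos]
        congr 1
        simp [mergeCellsPad]

-- ===== VERDICT (by name: the statement is the Claim_ definition above) =====
theorem mergeCells_spec : Claim_equal_mergeCells := by
  intro row _
  unfold Spec_mergeCells mergeCells mergeCells_alt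
  simpa using goA_eq_goB row [] ""
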